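-- pv_equiv track=rewrite | github.com/kylefoley76/german_language_analyzer | general/very_general_functions.py | divide_range_w_max
-- ===== SOURCE A (Python) =====
-- def divide_range_w_max(num: int, maxi: int):
--     '''
--     suppose you have a number 5,000,000 whereas
--     the highest acceptable number is 1,000,000.
--     this function will divide the number such that
--     each division has the same amount and each
--     division is less than the highest acceptable number.
--     further it will make a list of the ranges so as
--     to divide the list
--     '''
--
--     b = (num // maxi) + 1
--     c = num // b
--     lst = []
--     m = 0
--     lst_num = 0
--     for z in range(int(b)):
--         m += c
--         if z == b - 1:
--             lst.append([lst_num, num])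
--         else:
--             lst.append([lst_num, m])
--         lst_num = m
--
--     return lst
-- ===== SOURCE B (Python) =====
-- def divide_range_w_max(num: int, maxi: int):
--     b = (num // maxi) + 1
--     c = num // b
--
--     def build(lo, hi):
--         # sub-ranges for chunk indices in [lo, hi), by divide and conquer
--         if hi - lo <= 0:
--             return []
--         if hi - lo == 1:
--             return [[lo * c, num if hi == b else hi * c]]
--         mid = (lo + hi) // 2
--         return build(lo, mid) + build(mid, hi)
--
--     return build(0, b)
-- ===== Notes on version B (the rewrite author's own statement) =====
-- stated objective: alternative
-- what changed: Replaces A's single left-to-right loop with a mutable running sum and a last-iteration special case by a divide-and-conquer recursion over chunk indices: split [0,b) at the midpoint, build each half recursively, and concatenate; each leaf computes its bounds directly as lo*c and hi*c (or num for the final chunk).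
import Mathlib
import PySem

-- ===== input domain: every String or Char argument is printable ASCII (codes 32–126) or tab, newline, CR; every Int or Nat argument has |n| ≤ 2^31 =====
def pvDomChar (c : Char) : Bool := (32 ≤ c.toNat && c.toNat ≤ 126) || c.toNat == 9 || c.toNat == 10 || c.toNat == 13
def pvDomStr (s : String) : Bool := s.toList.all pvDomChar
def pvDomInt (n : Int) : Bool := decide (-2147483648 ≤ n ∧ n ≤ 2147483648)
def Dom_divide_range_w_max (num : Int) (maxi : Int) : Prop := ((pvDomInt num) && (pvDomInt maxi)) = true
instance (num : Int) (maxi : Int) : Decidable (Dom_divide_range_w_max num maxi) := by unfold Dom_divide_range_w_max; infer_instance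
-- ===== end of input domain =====

-- B replaces A's left-to-right loop with running sum and last-index special case by a
-- divide-and-conquer recursion over chunk indices [0,b); objective: alternative.

-- ===== PORT A =====
-- literal transliteration of A's loop; state = (lst, m, lst_num)
def divide_range_w_max (num : Int) (maxi : Int) : List (List Int) :=
  let b := PySem.Int.floordiv num maxi + 1
  let c := PySem.Int.floordiv num b
  ((PySem.List.pyRange 0 b 1).foldl
    (fun (st : List (List Int) × Int × Int) z =>
      let m := st.2.1 + c
      let lst := if z = b - 1 then st.1 ++ [[st.2.2, num]] else st.1 ++ [[st.2.2, m]]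
      (lst, m, m))
    ([], 0, 0)).1

-- ===== PORT B =====
-- Source B's inner 'build(lo, hi)': divide-and-conquer on the chunk-index interval.
-- Lean needs a termination measure, so we recurse on (hi - lo).toNat; the branch
-- structure and the values computed are exactly Source B's.
def pvBuild (num b c : Int) (lo hi : Int) : List (List Int) :=
  if _h0 : hi - lo ≤ 0 then []
  else if _h1 : hi - lo = 1 then [[lo * c, if hi = b then num else hi * c]]
  else
    pvBuild num b c lo (PySem.Int.floordiv (lo + hi) 2) ++
    pvBuild num b c (PySem.Int.floordiv (lo + hi) 2) hi
termination_by (hi - lo).toNat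
decreasing_by
  · rw [PySem.Int.floordiv_eq_ediv_of_pos (by omega)]; omega
  · rw [PySem.Int.floordiv_eq_ediv_of_pos (by omega)]; omega

def divide_range_w_max_alt (num : Int) (maxi : Int) : List (List Int) :=
  let b := PySem.Int.floordiv num maxi + 1
  let c := PySem.Int.floordiv num b
  pvBuild num b c 0 b

-- ===== PRECONDITION & SPEC =====
-- A raises ZeroDivisionError when maxi = 0 (first //) or when num // maxi = -1, i.e. b = 0 (second //); B raises there too.
def Pre_divide_range_w_max (num : Int) (maxi : Int) : Prop :=
  maxi ≠ 0 ∧ PySem.Int.floordiv num maxi + 1 ≠ 0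
instance (num : Int) (maxi : Int) : Decidable (Pre_divide_range_w_max num maxi) := by unfold Pre_divide_range_w_max; infer_instance
def pvWitness_divide_range_w_max : Int × Int := (10, 3)
def Spec_divide_range_w_max (num : Int) (maxi : Int) (out : List (List Int)) : Prop := out = divide_range_w_max_alt num maxi
instance (num : Int) (maxi : Int) (out : List (List Int)) : Decidable (Spec_divide_range_w_max num maxi out) := by unfold Spec_divide_range_w_max; infer_instance

-- ===== CLAIM (what is proved, stated in full; the proofs are below) =====
def Claim_equal_divide_range_w_max : Prop := ∀ (num : Int) (maxi : Int), Dom_divide_range_w_max num maxi → Pre_divide_range_w_max num maxi → Spec_divide_range_w_max num maxi (divide_range_w_max num maxi)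

-- ===== LEMMAS AND PROOFS =====

-- A's loop, with the invariant m = lst_num = a*c at the start of each iteration, appends
-- [z*c, num] at z = b-1 and [z*c, (z+1)*c] elsewhere.
theorem pv_loopA (num b c : Int) :
    ∀ (k : Nat) (a : Int) (acc : List (List Int)), b = a + k →
    ((PySem.List.pyRange a b 1).foldl
      (fun (st : List (List Int) × Int × Int) z =>
        let m := st.2.1 + c
        let lst := if z = b - 1 then st.1 ++ [[st.2.2, num]] else st.1 ++ [[st.2.2, m]]
        (lst, m, m))
      (acc, a * c, a * c)).1
    = acc ++ (PySem.List.pyRange a b 1).map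
        (fun i => if i + 1 = b then [i * c, num] else [i * c, (i + 1) * c]) := by
  intro k
  induction k with
  | zero =>
      intro a acc h
      rw [PySem.List.pyRange_one_eq_nil (by omega)]
      simp
  | succ n ih =>
      intro a acc h
      rw [PySem.List.pyRange_one_cons (by omega)]
      simp only [List.foldl_cons, List.map_cons]
      have harith : a * c + c = (a + 1) * c := by ring
      by_cases hz : a + 1 = b
      · rw [if_pos (show a = b - 1 by omega), if_pos hz, harith,
            ih (a + 1) (acc ++ [[a * c, num]]) (by omega)]
        simp
      · rw [if_neg (show ¬ a = b - 1 by omega), if_neg hz, harith,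
            ih (a + 1) (acc ++ [[a * c, (a + 1) * c]]) (by omega)]
        simp

-- B's divide-and-conquer produces exactly the chunk for each index in [lo, hi).
theorem pv_build_eq (num b c : Int) :
    ∀ (n : Nat) (lo hi : Int), (hi - lo).toNat = n →
    pvBuild num b c lo hi = (PySem.List.pyRange lo hi 1).map
      (fun i => if i + 1 = b then [i * c, num] else [i * c, (i + 1) * c]) := by
  intro n
  induction n using Nat.strong_induction_on with
  | _ n ih =>
    intro lo hi hn
    rw [pvBuild]
    by_cases h0 : hi - lo ≤ 0
    · rw [dif_pos h0, PySem.List.pyRange_one_eq_nil (by omega)]; simp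
    · rw [dif_neg h0]
      by_cases h1 : hi - lo = 1
      · rw [dif_pos h1]
        have hhi : hi = lo + 1 := by omega
        subst hhi
        rw [PySem.List.pyRange_one_singleton]
        simp only [List.map_cons, List.map_nil]
        split_ifs with h <;> rfl
      · rw [dif_neg h1]
        have hmid : lo + 1 ≤ PySem.Int.floordiv (lo + hi) 2 ∧
            PySem.Int.floordiv (lo + hi) 2 + 1 ≤ hi := by
          rw [PySem.Int.floordiv_eq_ediv_of_pos (by omega)]
          omega
        obtain ⟨hm1, hm2⟩ := hmid
        rw [ih (PySem.Int.floordiv (lo + hi) 2 - lo).toNat (by omega) lo _ rfl,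
            ih (hi - PySem.Int.floordiv (lo + hi) 2).toNat (by omega) _ hi rfl,
            PySem.List.pyRange_one_append lo (PySem.Int.floordiv (lo + hi) 2) hi
              (by omega) (by omega), List.map_append]

-- ===== VERDICT (by name: the statement is the Claim_ definition above) =====
theorem divide_range_w_max_spec : Claim_equal_divide_range_w_max := by
  intro num maxi _ _
  unfold Spec_divide_range_w_max divide_range_w_max divide_range_w_max_alt
  dsimp only
  set b := PySem.Int.floordiv num maxi + 1
  set c := PySem.Int.floordiv num b
  by_cases hpos : 0 < b
  · have h := pv_loopA num b c b.toNat 0 [] (by omega)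
    simp only [zero_mul] at h
    rw [h, List.nil_append, pv_build_eq num b c (b - 0).toNat 0 b rfl]
  · rw [PySem.List.pyRange_one_eq_nil (by omega),
        pv_build_eq num b c (b - 0).toNat 0 b rfl,
        PySem.List.pyRange_one_eq_nil (by omega)]
    simp
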